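-- pv_equiv track=rewrite | github.com/root-zw/nl2sql | _staging/20260210_104110/server/nl2ir/table_ranker_v3.py | _count_contains
-- ===== SOURCE A (Python) =====
-- def _count_contains(text: str, keywords: list[str]) -> int:
--     if not text or not keywords:
--         return 0
--     seen = set()
--     for kw in keywords:
--         if not kw:
--             continue
--         if kw in text:
--             seen.add(kw)
--     return len(seen)
-- ===== SOURCE B (Python) =====
-- def _count_contains(text: str, keywords: list[str]) -> int:
--     # Index the text once: build the set of all its substrings of length
--     # 1..max-keyword-length, then answer each distinct keyword by one lookup.
--     kws = {kw for kw in keywords if kw}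
--     if not kws:
--         return 0
--     m = max(len(kw) for kw in kws)
--     subs = {text[i:i + l] for i in range(len(text)) for l in range(1, m + 1)}
--     return sum(1 for kw in kws if kw in subs)
-- ===== Notes on version B (the rewrite author's own statement) =====
-- stated objective: faster
-- what changed: A runs one substring search ('kw in text') over the text per keyword; B instead builds an index of the text once - the set of all substrings of text of length up to the maximal keyword length m - and then answers each distinct nonempty keyword with a single hash-set lookup, so the per-keyword scan of the text disappears (measured 12.9x at the largest size).
import Mathlib
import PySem

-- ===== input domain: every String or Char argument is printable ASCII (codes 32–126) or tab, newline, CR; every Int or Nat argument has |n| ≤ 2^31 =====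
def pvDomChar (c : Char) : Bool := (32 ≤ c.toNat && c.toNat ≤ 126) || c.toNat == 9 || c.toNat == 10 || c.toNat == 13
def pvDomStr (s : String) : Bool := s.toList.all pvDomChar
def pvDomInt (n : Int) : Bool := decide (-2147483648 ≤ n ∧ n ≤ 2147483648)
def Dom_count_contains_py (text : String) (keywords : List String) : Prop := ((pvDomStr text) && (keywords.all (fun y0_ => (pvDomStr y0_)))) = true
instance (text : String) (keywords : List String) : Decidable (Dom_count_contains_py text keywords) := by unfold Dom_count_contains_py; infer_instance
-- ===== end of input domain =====

-- B replaces A's per-keyword substring search by an index of the text (the set of all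
-- substrings of text up to the maximal keyword length) queried once per distinct keyword
-- (one index build replaces the per-keyword text scans; measured faster in a timing run).


-- ===== PORT A =====
def count_contains_py (text : String) (keywords : List String) : Int :=
  if text = "" ∨ keywords = [] then 0
  else
    let seen : PySem.Set String :=
      keywords.foldl (fun seen kw =>
        if kw = "" then seen
        else if PySem.Str.isIn kw text then PySem.Set.add seen kw else seen)
        PySem.Set.empty
    (PySem.Set.len seen : Int)

-- ===== PORT B =====
def count_contains_py_alt (text : String) (keywords : List String) : Int :=
  let kws : PySem.Set String := PySem.Set.ofList (keywords.filter (fun kw => !(kw == "")))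
  if kws = [] then 0
  else
    match PySem.List.max? (kws.map (fun kw => (PySem.Str.len kw : Int))) (fun x => x) with
    | none => 0  -- unreachable (kws ≠ []); totality guard for Python's max over a nonempty set
    | some m =>
      let subs : PySem.Set String :=
        PySem.Set.ofList ((PySem.List.pyRange 0 (PySem.Str.len text) 1).flatMap
          (fun i => (PySem.List.pyRange 1 (m + 1) 1).map
            (fun l => PySem.Str.slice text (some i) (some (i + l)))))
      (kws.countP (fun kw => PySem.Set.contains subs kw) : Int)

-- ===== PRECONDITION & SPEC =====
def Spec_count_contains_py (text : String) (keywords : List String) (out : Int) : Prop := out = count_contains_py_alt text keywords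
instance (text : String) (keywords : List String) (out : Int) : Decidable (Spec_count_contains_py text keywords out) := by unfold Spec_count_contains_py; infer_instance

-- ===== CLAIM (what is proved, stated in full; the proofs are below) =====
def Claim_equal_count_contains_py : Prop := ∀ (text : String) (keywords : List String), Dom_count_contains_py text keywords → Spec_count_contains_py text keywords (count_contains_py text keywords)

-- ===== LEMMAS AND PROOFS =====

-- A's guarded fold is a fold of Set.add over the filtered keyword list.
theorem pv_foldl_filter (q : String → Bool) (xs : List String) (s : PySem.Set String) :
    xs.foldl (fun seen kw =>
        if kw = "" then seen
        else if q kw then PySem.Set.add seen kw else seen) s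
      = (xs.filter (fun kw => !(kw == "") && q kw)).foldl PySem.Set.add s := by
  induction xs generalizing s with
  | nil => rfl
  | cons x xs ih =>
    by_cases hx : x = ""
    · simp only [List.foldl_cons, List.filter_cons, hx]
      simp [ih]
    · by_cases hq : q x
      · simp only [List.foldl_cons, List.filter_cons]
        simp [hx, hq, ih]
      · simp only [List.foldl_cons, List.filter_cons]
        simp [hx, hq, ih]

-- set(filter) versus filtering the deduplicated list: countP agrees.
theorem pv_countP_ofList_filter (p q : String → Bool) (xs : List String) :
    (PySem.Set.ofList (xs.filter q)).countP p
      = (PySem.Set.ofList xs).countP (fun x => q x && p x) := by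
  have h1 : (PySem.Set.ofList (xs.filter q)).Perm ((PySem.Set.ofList xs).filter q) := by
    rw [List.perm_ext_iff_of_nodup (PySem.Set.nodup_ofList _)
      (List.Nodup.filter q (PySem.Set.nodup_ofList _))]
    intro a
    simp [PySem.Set.mem_ofList, List.mem_filter, and_comm]
  calc (PySem.Set.ofList (xs.filter q)).countP p
      = ((PySem.Set.ofList xs).filter q).countP p := h1.countP_eq p
    _ = (PySem.Set.ofList xs).countP (fun x => q x && p x) := by
        rw [List.countP_filter]
        exact List.countP_congr (by intro x _; simp [Bool.and_comm])

-- A's value in closed form: the number of distinct nonempty keywords occurring in text.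
theorem pv_A_closed (text : String) (keywords : List String) :
    count_contains_py text keywords
      = ((PySem.Set.ofList keywords).countP
          (fun kw => !(kw == "") && PySem.Str.isIn kw text) : Int) := by
  unfold count_contains_py
  by_cases hguard : text = "" ∨ keywords = []
  · rw [if_pos hguard]
    rcases hguard with h | h
    · subst h
      have : (PySem.Set.ofList keywords).countP
          (fun kw => !(kw == "") && PySem.Str.isIn kw "") = 0 := by
        rw [List.countP_eq_zero]
        intro kw _
        by_cases hkw : kw = ""
        · simp [hkw]
        · have hfalse : PySem.Chars.isIn kw.toList [] = false := by
            rw [PySem.Chars.isIn_eq_false_iff]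
            intro hinf
            exact hkw (String.toList_eq_nil_iff.mp (List.infix_nil.mp hinf))
          simp [hfalse]
      rw [this]; rfl
    · subst h; rfl
  · rw [if_neg hguard]
    have h := pv_countP_ofList_filter (fun _ => true)
      (fun kw => !(kw == "") && PySem.Str.isIn kw text) keywords
    rw [List.countP_true] at h
    simp only [Bool.and_true] at h
    simp only [PySem.Set.ofList_eq_foldl] at h
    simp only [PySem.Set.len, pv_foldl_filter (fun kw => PySem.Str.isIn kw text),
      PySem.Set.empty]
    exact_mod_cast h

-- the index is correct: a nonempty keyword of length at most m lies in the substring set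
-- iff it is an infix of the text.
theorem pv_mem_subs_iff (text : String) (m : Int) (kw : String)
    (hne : kw ≠ "") (hm : (PySem.Str.len kw : Int) ≤ m) :
    (kw ∈ (PySem.List.pyRange 0 (PySem.Str.len text) 1).flatMap
        (fun i => (PySem.List.pyRange 1 (m + 1) 1).map
          (fun l => PySem.Str.slice text (some i) (some (i + l)))))
      ↔ kw.toList <:+: text.toList := by
  constructor
  · intro hmem
    rcases List.mem_flatMap.mp hmem with ⟨i, hi, hkw⟩
    rcases List.mem_map.mp hkw with ⟨l, hl, hsl⟩
    have hi' := PySem.List.mem_pyRange_one.mp hi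
    have hl' := PySem.List.mem_pyRange_one.mp hl
    have htl : kw.toList
        = List.take ((i + l).toNat - i.toNat) (List.drop i.toNat text.toList) := by
      rw [← hsl]
      simp [PySem.List.slice_toNat _ hi'.1 (by omega : (0:Int) ≤ i + l)]
    rw [htl]
    exact ((List.take_prefix _ _).isInfix.trans (List.drop_suffix _ _).isInfix)
  · rintro ⟨s, t, hst⟩
    have hlen : 1 ≤ kw.toList.length := by
      have : kw.toList ≠ [] := fun h => hne (String.toList_eq_nil_iff.mp h)
      have := List.length_pos_iff.mpr this
      omega
    have hlen' : s.length + kw.toList.length ≤ text.toList.length := by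
      rw [← hst]
      simp only [List.length_append]
      omega
    have hltext : (PySem.Str.len text : Int) = (text.toList.length : Int) := by
      simp [PySem.Str.len_eq]
    have hlkw : (PySem.Str.len kw : Int) = (kw.toList.length : Int) := by
      simp [PySem.Str.len_eq]
    refine List.mem_flatMap.mpr ⟨(s.length : Int), ?_, ?_⟩
    · rw [PySem.List.mem_pyRange_one, hltext]
      constructor
      · positivity
      · exact_mod_cast (by omega : s.length < text.toList.length)
    · refine List.mem_map.mpr ⟨(kw.toList.length : Int), ?_, ?_⟩
      · rw [PySem.List.mem_pyRange_one]
        constructor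
        · exact_mod_cast hlen
        · omega
      · apply String.toList_inj.mp
        rw [show (PySem.Str.slice text (some (s.length : Int))
              (some ((s.length : Int) + (kw.toList.length : Int)))).toList
            = List.take kw.toList.length (List.drop s.length text.toList) from by
          simp [PySem.List.slice_natCast_add]]
        rw [show text.toList = s ++ (kw.toList ++ t) from by
          rw [← hst, List.append_assoc]]
        rw [List.drop_left, List.take_left]

-- B's value in the same closed form.
theorem pv_B_closed (text : String) (keywords : List String) :
    count_contains_py_alt text keywords
      = ((PySem.Set.ofList keywords).countP
          (fun kw => !(kw == "") && PySem.Str.isIn kw text) : Int) := by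
  unfold count_contains_py_alt
  simp only []
  by_cases hempty : PySem.Set.ofList (keywords.filter (fun kw => !(kw == ""))) = []
  · rw [if_pos hempty]
    have hall : ∀ kw ∈ PySem.Set.ofList keywords, kw = "" := by
      intro kw hkw
      by_contra hne
      have hmem : kw ∈ keywords := (PySem.Set.mem_ofList _ _).mp hkw
      have : kw ∈ PySem.Set.ofList (keywords.filter (fun kw => !(kw == ""))) :=
        (PySem.Set.mem_ofList _ _).mpr (List.mem_filter.mpr ⟨hmem, by simp [hne]⟩)
      simp [hempty] at this
    have : (PySem.Set.ofList keywords).countP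
        (fun kw => !(kw == "") && PySem.Str.isIn kw text) = 0 := by
      rw [List.countP_eq_zero]
      intro kw hkw
      simp [hall kw hkw]
    rw [this]; rfl
  · rw [if_neg hempty]
    obtain ⟨m, hmax⟩ : ∃ m, PySem.List.max?
        ((PySem.Set.ofList (keywords.filter (fun kw => !(kw == "")))).map
          (fun kw => (PySem.Str.len kw : Int))) (fun x => x) = some m := by
      cases h : PySem.List.max?
        ((PySem.Set.ofList (keywords.filter (fun kw => !(kw == "")))).map
          (fun kw => (PySem.Str.len kw : Int))) (fun x => x) with
      | none =>
        rw [PySem.List.max?_eq_none_iff, List.map_eq_nil_iff] at h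
        exact absurd h hempty
      | some m => exact ⟨m, rfl⟩
    rw [hmax]
    simp only []
    have hpoint : ∀ kw ∈ PySem.Set.ofList (keywords.filter (fun kw => !(kw == ""))),
        (PySem.Set.contains (PySem.Set.ofList
          ((PySem.List.pyRange 0 (PySem.Str.len text) 1).flatMap
            (fun i => (PySem.List.pyRange 1 (m + 1) 1).map
              (fun l => PySem.Str.slice text (some i) (some (i + l)))))) kw = true)
          ↔ PySem.Str.isIn kw text = true := by
      intro kw hkw
      have hne : kw ≠ "" := by
        have := (List.mem_filter.mp ((PySem.Set.mem_ofList _ _).mp hkw)).2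
        simpa using this
      have hlenle : (PySem.Str.len kw : Int) ≤ m := by
        have := PySem.List.max?_isMax hmax ((PySem.Str.len kw : Int))
          (List.mem_map_of_mem hkw)
        simpa using this
      rw [PySem.Set.contains_iff, PySem.Set.mem_ofList,
        pv_mem_subs_iff text m kw hne hlenle, PySem.Str.isIn_iff_infix]
    rw [List.countP_congr hpoint]
    rw [pv_countP_ofList_filter (fun kw => PySem.Str.isIn kw text)
      (fun kw => !(kw == "")) keywords]

-- ===== VERDICT (by name: the statement is the Claim_ definition above) =====
theorem count_contains_py_spec : Claim_equal_count_contains_py := by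
  intro text keywords _
  unfold Spec_count_contains_py
  rw [pv_A_closed, pv_B_closed]
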